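-- pv_equiv track=rewrite | github.com/jaeyo03/CodingTest | DFS,BFS/HW2.py | solution
-- ===== SOURCE A (Python) =====
-- from copy import deepcopy
-- from collections import deque
--
-- def solution(arr, brr):
--     arr = deque(arr)
--     brr = deque(brr)
--     queue = deque([(arr, brr, 0)])
--
--     while queue:
--         temp_arr, temp_brr, count = queue.popleft()
--         is_same = False
--
--         for i in range(len(temp_arr)):
--             if temp_arr[i] == 1 and temp_brr[i] == 1:
--                 is_same = True
--                 break
--
--         if not is_same:
--             return count
--
--         # 1
--         a1 = deepcopy(temp_arr)
--         b1 = deepcopy(temp_brr)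
--         a1.appendleft(0)
--         b1.append(0)
--         queue.append((a1, b1, count + 2))
--
--         # 2
--         a2 = deepcopy(temp_arr)
--         b2 = deepcopy(temp_brr)
--         a2.append(0)
--         b2.appendleft(0)
--         queue.append((a2, b2, count + 2))
-- ===== SOURCE B (Python) =====
-- def solution(arr, brr):
--     n = len(brr)
--
--     def overlap(d):
--         return any(a == 1 and 0 <= j + d < n and brr[j + d] == 1
--                    for j, a in enumerate(arr))
--
--     k = 0
--     while overlap(k) and overlap(-k):
--         k += 1
--     return 2 * k
-- ===== Notes on version B (the rewrite author's own statement) =====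
-- stated objective: faster
-- what changed: Replaces the exponential BFS over explicitly zero-padded copies of both arrays (2^k states at shift-depth k) by a direct scan of relative offsets k = 0,1,2,... testing overlap in both shift directions and returning 2k at the first offset-free alignment.
-- outside the precondition, e.g. on solution([1, 1], [1]): A raises IndexError, B returns 2; on solution([1, -1, -1, 1], [1, 1, -1]): A returns 2, B returns 2
import Mathlib
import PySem

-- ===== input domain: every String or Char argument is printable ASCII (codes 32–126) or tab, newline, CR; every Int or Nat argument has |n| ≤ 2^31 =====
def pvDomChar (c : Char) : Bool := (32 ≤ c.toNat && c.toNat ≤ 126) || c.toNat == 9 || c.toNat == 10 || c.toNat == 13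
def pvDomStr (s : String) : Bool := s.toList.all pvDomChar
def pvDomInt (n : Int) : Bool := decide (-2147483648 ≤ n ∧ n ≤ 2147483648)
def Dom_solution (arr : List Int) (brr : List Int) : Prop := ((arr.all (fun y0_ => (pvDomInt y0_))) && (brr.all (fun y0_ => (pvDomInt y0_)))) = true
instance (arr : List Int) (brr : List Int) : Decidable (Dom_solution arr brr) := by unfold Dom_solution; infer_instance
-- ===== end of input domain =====

-- B replaces A's exponential BFS over padded array copies by a direct upward scan of the
-- relative offset, testing both shift directions; equivalence of return values is proved on Pre_.

-- ===== PORT A =====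
-- the inner scan `for i in range(len(a)): if a[i]==1 and b[i]==1: …` as structural recursion
-- over both lists in parallel; exact where Python does not raise (Pre_ excludes the raising inputs:
-- when `a` still holds a 1 after `b` is exhausted, Python raises IndexError while this returns false)
def isSame : List Int → List Int → Bool
  | [], _ => false
  | _ :: _, [] => false
  | x :: xs, y :: ys => (x == 1 && y == 1) || isSame xs ys

-- the BFS `while queue:` loop; fuel only makes the same computation total (2^(len brr + 1)
-- dequeues are proved sufficient below), the per-step work is exactly A's
def bfsLoop : Nat → List (List Int × List Int × Int) → Int
  | 0, _ => 0
  | _ + 1, [] => 0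
  | fuel + 1, (a, b, c) :: rest =>
    if isSame a b then
      bfsLoop fuel (rest ++ [(0 :: a, b ++ [0], c + 2), (a ++ [0], 0 :: b, c + 2)])
    else c

def solution (arr : List Int) (brr : List Int) : Int :=
  bfsLoop (2 ^ (brr.length + 1)) [(arr, brr, 0)]

-- ===== PORT B =====
-- overlap(d) = any(a == 1 and 0 <= j+d < n and brr[j+d] == 1 for j, a in enumerate(arr))
def ovB (arr : List Int) (brr : List Int) (d : Int) : Bool :=
  (PySem.List.enumerate arr 0).any (fun ja =>
    ja.2 == 1 && decide (0 ≤ ja.1 + d) && decide (ja.1 + d < (brr.length : Int)) &&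
      (PySem.List.pyGetD brr (ja.1 + d) 0 == 1))

-- needed by findK's termination: a positive offset with overlap is below len(brr)
theorem ovB_true_lt (arr brr : List Int) (k : Nat) (h : ovB arr brr (k : Int) = true) :
    k < brr.length := by
  unfold ovB at h
  rw [List.any_eq_true] at h
  obtain ⟨ja, hmem, hcond⟩ := h
  rw [PySem.List.mem_enumerate_iff] at hmem
  obtain ⟨i, hi, rfl⟩ := hmem
  simp only [Bool.and_eq_true, decide_eq_true_eq] at hcond
  omega

-- the `k = 0; while overlap(k) and overlap(-k): k += 1; return 2*k` loop
def findK (arr : List Int) (brr : List Int) (k : Nat) : Nat :=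
  if h : ovB arr brr (k : Int) && ovB arr brr (-(k : Int)) then
    findK arr brr (k + 1)
  else k
termination_by brr.length - k
decreasing_by
  rw [Bool.and_eq_true] at h
  have := ovB_true_lt arr brr k h.1
  omega

def solution_alt (arr : List Int) (brr : List Int) : Int :=
  2 * ((findK arr brr 0 : Nat) : Int)

-- ===== PRECONDITION & SPEC =====
-- Pre_ excludes inputs where arr has a value 1 at an index ≥ len(brr): on (exactly) some of those
-- the Python A's short-circuit scan reaches that 1 past the end of the padded brr and raises
-- IndexError (on the rest A returns and agrees with B, but whether it raises depends on the run,
-- so the whole closed-form region is excluded).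
def Pre_solution (arr : List Int) (brr : List Int) : Prop :=
  ∀ j, j < arr.length → arr.getD j 0 = 1 → j < brr.length
instance (arr : List Int) (brr : List Int) : Decidable (Pre_solution arr brr) := by
  unfold Pre_solution; infer_instance

def pvWitness_solution : List Int × List Int := ([1], [1, 0])

def Spec_solution (arr : List Int) (brr : List Int) (out : Int) : Prop := out = solution_alt arr brr
instance (arr : List Int) (brr : List Int) (out : Int) : Decidable (Spec_solution arr brr out) := by
  unfold Spec_solution; infer_instance

-- ===== CLAIM (what is proved, stated in full; the proofs are below) =====
def Claim_equal_solution : Prop := ∀ (arr : List Int) (brr : List Int), Dom_solution arr brr → Pre_solution arr brr → Spec_solution arr brr (solution arr brr)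

-- ===== LEMMAS AND PROOFS =====

def zerosI (n : Nat) : List Int := List.replicate n 0

-- the BFS state reached by p left-shifts and q right-shifts
def mkSt (arr brr : List Int) (pq : Nat × Nat) : List Int × List Int × Int :=
  (zerosI pq.1 ++ arr ++ zerosI pq.2, zerosI pq.2 ++ brr ++ zerosI pq.1,
   2 * ((pq.1 : Int) + (pq.2 : Int)))

def level : Nat → List (Nat × Nat)
  | 0 => [(0, 0)]
  | m + 1 => (level m).flatMap (fun pq => [(pq.1 + 1, pq.2), (pq.1, pq.2 + 1)])

theorem zerosI_getD (n i : Nat) : (zerosI n).getD i 0 = 0 := by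
  unfold zerosI
  by_cases h : i < n
  · rw [List.getD_eq_getElem _ _ (by simpa using h)]; simp
  · rw [List.getD_eq_default _ _ (by simpa using h)]

theorem isSame_iff (a b : List Int) :
    isSame a b = true ↔ ∃ i, i < a.length ∧ i < b.length ∧ a.getD i 0 = 1 ∧ b.getD i 0 = 1 := by
  induction a generalizing b with
  | nil => simp [isSame]
  | cons x xs ih =>
    cases b with
    | nil => simp [isSame]
    | cons y ys =>
      simp only [isSame, Bool.or_eq_true, Bool.and_eq_true, beq_iff_eq, ih]
      constructor
      · rintro (⟨hx, hy⟩ | ⟨i, h1, h2, h3, h4⟩)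
        · exact ⟨0, by simp [hx, hy]⟩
        · exact ⟨i + 1, by simpa using h1, by simpa using h2, by simpa using h3, by simpa using h4⟩
      · rintro ⟨i, h1, h2, h3, h4⟩
        cases i with
        | zero =>
          left
          simp only [List.getD_cons_zero] at h3 h4
          exact ⟨h3, h4⟩
        | succ j => right; exact ⟨j, by simpa using h1, by simpa using h2, by simpa using h3, by simpa using h4⟩

theorem ovB_iff (arr brr : List Int) (d : Int) :
    ovB arr brr d = true ↔
      ∃ j : Nat, j < arr.length ∧ arr.getD j 0 = 1 ∧ 0 ≤ (j : Int) + d ∧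
        (j : Int) + d < brr.length ∧ brr.getD ((j : Int) + d).toNat 0 = 1 := by
  unfold ovB
  rw [List.any_eq_true]
  constructor
  · rintro ⟨ja, hmem, hcond⟩
    rw [PySem.List.mem_enumerate_iff] at hmem
    obtain ⟨j, hj, rfl⟩ := hmem
    simp only [Bool.and_eq_true, beq_iff_eq, decide_eq_true_eq] at hcond
    obtain ⟨⟨⟨h1, h2⟩, h3⟩, h4⟩ := hcond
    simp only [zero_add] at h1 h2 h3 h4
    refine ⟨j, hj, ?_, h2, h3, ?_⟩
    · rw [List.getD_eq_getElem _ _ hj]; exact h1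
    · rw [PySem.List.pyGetD_eq_getElem brr 0 h2 h3] at h4
      rw [List.getD_eq_getElem _ _ (show ((j : Int) + d).toNat < brr.length by omega)]
      exact h4
  · rintro ⟨j, hj, h1, h2, h3, h4⟩
    refine ⟨((j : Int), arr[j]), ?_, ?_⟩
    · rw [PySem.List.mem_enumerate_iff]; exact ⟨j, hj, by simp⟩
    · simp only [Bool.and_eq_true, beq_iff_eq, decide_eq_true_eq]
      rw [List.getD_eq_getElem _ _ hj] at h1
      refine ⟨⟨⟨h1, h2⟩, h3⟩, ?_⟩
      rw [PySem.List.pyGetD_eq_getElem brr 0 h2 h3]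
      rw [List.getD_eq_getElem _ _ (show ((j : Int) + d).toNat < brr.length by omega)] at h4
      exact h4

theorem pad_getD_one (p q : Nat) (l : List Int) (i : Nat) :
    (zerosI p ++ l ++ zerosI q).getD i 0 = 1 ↔
      ∃ j, j < l.length ∧ i = p + j ∧ l.getD j 0 = 1 := by
  have hzp : (zerosI p).length = p := by simp [zerosI]
  have hzl : (zerosI p ++ l).length = p + l.length := by simp [zerosI]
  constructor
  · intro h
    by_cases hi : i < p + l.length
    · rw [List.getD_append _ _ _ _ (by omega)] at h
      by_cases hp : i < p
      · rw [List.getD_append _ _ _ _ (by omega)] at h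
        rw [zerosI_getD] at h; exact absurd h (by norm_num)
      · rw [List.getD_append_right _ _ _ _ (by omega), hzp] at h
        exact ⟨i - p, by omega, by omega, h⟩
    · rw [List.getD_append_right _ _ _ _ (by omega)] at h
      rw [zerosI_getD] at h; exact absurd h (by norm_num)
  · rintro ⟨j, hj, rfl, hl⟩
    rw [List.getD_append _ _ _ _ (by omega)]
    rw [List.getD_append_right _ _ _ _ (by omega), hzp, show p + j - p = j by omega]
    exact hl

-- the inner scan on the padded state equals B's overlap test at offset p - q
theorem isSame_eq_ovB (arr brr : List Int) (p q : Nat) :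
    isSame (zerosI p ++ arr ++ zerosI q) (zerosI q ++ brr ++ zerosI p)
      = ovB arr brr ((p : Int) - (q : Int)) := by
  rw [Bool.eq_iff_iff, isSame_iff, ovB_iff]
  constructor
  · rintro ⟨i, _, _, ha, hb⟩
    rw [pad_getD_one] at ha hb
    obtain ⟨j, hj, hij, hja⟩ := ha
    obtain ⟨j', hj', hij', hjb⟩ := hb
    refine ⟨j, hj, hja, by omega, by omega, ?_⟩
    have : ((j : Int) + ((p : Int) - (q : Int))).toNat = j' := by omega
    rw [this]; exact hjb
  · rintro ⟨j, hj, hja, h2, h3, hjb⟩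
    refine ⟨p + j, by simp [zerosI]; omega, by simp [zerosI] at h3 ⊢; omega, ?_, ?_⟩
    · rw [pad_getD_one]; exact ⟨j, hj, rfl, hja⟩
    · rw [pad_getD_one]
      exact ⟨((j : Int) + ((p : Int) - (q : Int))).toNat, by omega, by omega, hjb⟩

theorem level_sum : ∀ m, ∀ pq ∈ level m, pq.1 + pq.2 = m := by
  intro m
  induction m with
  | zero => simp [level]
  | succ m ih =>
    intro pq hpq
    simp only [level, List.mem_flatMap] at hpq
    obtain ⟨x, hx, hmem⟩ := hpq
    have := ih x hx
    simp only [List.mem_cons] at hmem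
    rcases hmem with rfl | rfl | h
    · simp; omega
    · simp; omega
    · simp at h

theorem level_mem : ∀ m p q, p + q = m → (p, q) ∈ level m := by
  intro m
  induction m with
  | zero => intro p q h; simp [level]; omega
  | succ m ih =>
    intro p q h
    simp only [level, List.mem_flatMap]
    rcases Nat.eq_zero_or_pos p with rfl | hp
    · have hq : q = m + 1 := by omega
      subst hq
      exact ⟨(0, m), ih 0 m (by omega), by simp⟩
    · exact ⟨(p - 1, q), ih (p - 1) q (by omega), by simp; omega⟩

theorem level_len : ∀ m, (level m).length = 2 ^ m := by
  intro m
  induction m with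
  | zero => simp [level]
  | succ m ih =>
    simp only [level, List.length_flatMap]
    have : ((level m).map fun pq => ([(pq.1 + 1, pq.2), (pq.1, pq.2 + 1)] : List (Nat × Nat)).length)
        = (level m).map (fun _ => 2) := by
      apply List.map_congr_left; intro x _; rfl
    rw [this]
    rw [show (List.map (fun (_ : Nat × Nat) => 2) (level m)) = List.replicate (level m).length 2 by
      simp [List.map_const']]
    rw [List.sum_replicate, ih]
    simp [Nat.pow_succ]

-- processing one whole level of overlapping states appends exactly the next level's states
theorem bfs_process (arr brr : List Int) :
    ∀ (pqs : List (Nat × Nat)) (rest : List (List Int × List Int × Int)) (fuel : Nat),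
      pqs.length ≤ fuel →
      (∀ pq ∈ pqs, isSame (mkSt arr brr pq).1 (mkSt arr brr pq).2.1 = true) →
      bfsLoop fuel (pqs.map (mkSt arr brr) ++ rest) =
        bfsLoop (fuel - pqs.length)
          (rest ++ (pqs.flatMap (fun pq => [(pq.1 + 1, pq.2), (pq.1, pq.2 + 1)])).map (mkSt arr brr)) := by
  intro pqs
  induction pqs with
  | nil => intro rest fuel _ _; simp
  | cons pq tl ih =>
    intro rest fuel hfuel hov
    obtain ⟨f, rfl⟩ : ∃ f, fuel = f + 1 := ⟨fuel - 1, by simp at hfuel; omega⟩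
    obtain ⟨p, q⟩ := pq
    have hchild1 : (0 :: (mkSt arr brr (p, q)).1, (mkSt arr brr (p, q)).2.1 ++ [0],
        (mkSt arr brr (p, q)).2.2 + 2) = mkSt arr brr (p + 1, q) := by
      refine Prod.ext ?_ (Prod.ext ?_ ?_)
      · show 0 :: (zerosI p ++ arr ++ zerosI q) = zerosI (p + 1) ++ arr ++ zerosI q
        simp [zerosI, List.replicate_succ]
      · show (zerosI q ++ brr ++ zerosI p) ++ [0] = zerosI q ++ brr ++ zerosI (p + 1)
        simp [zerosI, List.replicate_succ']
      · show 2 * ((p : Int) + (q : Int)) + 2 = 2 * (((p + 1 : Nat) : Int) + (q : Int))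
        push_cast; ring
    have hchild2 : ((mkSt arr brr (p, q)).1 ++ [0], 0 :: (mkSt arr brr (p, q)).2.1,
        (mkSt arr brr (p, q)).2.2 + 2) = mkSt arr brr (p, q + 1) := by
      refine Prod.ext ?_ (Prod.ext ?_ ?_)
      · show (zerosI p ++ arr ++ zerosI q) ++ [0] = zerosI p ++ arr ++ zerosI (q + 1)
        simp [zerosI, List.replicate_succ']
      · show 0 :: (zerosI q ++ brr ++ zerosI p) = zerosI (q + 1) ++ brr ++ zerosI p
        simp [zerosI, List.replicate_succ]
      · show 2 * ((p : Int) + (q : Int)) + 2 = 2 * ((p : Int) + ((q + 1 : Nat) : Int))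
        push_cast; ring
    show bfsLoop (f + 1) (mkSt arr brr (p, q) :: (tl.map (mkSt arr brr) ++ rest)) = _
    rw [show mkSt arr brr (p, q) = ((mkSt arr brr (p, q)).1, (mkSt arr brr (p, q)).2.1,
      (mkSt arr brr (p, q)).2.2) from rfl]
    simp only [bfsLoop]
    rw [if_pos (hov _ (by simp))]
    rw [hchild1, hchild2]
    rw [List.append_assoc]
    rw [ih (rest ++ [mkSt arr brr (p + 1, q), mkSt arr brr (p, q + 1)]) f
      (by simp at hfuel ⊢; omega) (fun x hx => hov x (by simp [hx]))]
    simp only [List.flatMap_cons, List.map_cons,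
      List.append_assoc, List.cons_append, List.nil_append, List.length_cons]
    rw [show f + 1 - (tl.length + 1) = f - tl.length by omega]

-- once the queue holds a level containing a non-overlapping state, A returns that level's count
theorem bfs_final (arr brr : List Int) (K : Nat) :
    ∀ (pqs : List (Nat × Nat)) (junk : List (List Int × List Int × Int)) (fuel : Nat),
      pqs.length ≤ fuel →
      (∀ pq ∈ pqs, pq.1 + pq.2 = K) →
      (∃ pq ∈ pqs, isSame (mkSt arr brr pq).1 (mkSt arr brr pq).2.1 = false) →
      bfsLoop fuel (pqs.map (mkSt arr brr) ++ junk) = 2 * (K : Int) := by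
  intro pqs
  induction pqs with
  | nil => rintro junk fuel _ _ ⟨pq, hmem, _⟩; simp at hmem
  | cons pq tl ih =>
    rintro junk fuel hfuel hsum ⟨x, hx, hxf⟩
    obtain ⟨f, rfl⟩ : ∃ f, fuel = f + 1 := ⟨fuel - 1, by simp at hfuel; omega⟩
    show bfsLoop (f + 1) (mkSt arr brr pq :: (tl.map (mkSt arr brr) ++ junk)) = _
    rw [show mkSt arr brr pq = ((mkSt arr brr pq).1, (mkSt arr brr pq).2.1,
      (mkSt arr brr pq).2.2) from rfl]
    simp only [bfsLoop]
    by_cases hs : isSame (mkSt arr brr pq).1 (mkSt arr brr pq).2.1 = true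
    · rw [if_pos hs]
      rcases List.mem_cons.mp hx with rfl | hxtl
      · rw [hxf] at hs; simp at hs
      · have := ih (junk ++ [(0 :: (mkSt arr brr pq).1, (mkSt arr brr pq).2.1 ++ [0],
            (mkSt arr brr pq).2.2 + 2), ((mkSt arr brr pq).1 ++ [0], 0 :: (mkSt arr brr pq).2.1,
            (mkSt arr brr pq).2.2 + 2)]) f (by simp at hfuel ⊢; omega)
          (fun y hy => hsum y (by simp [hy])) ⟨x, hxtl, hxf⟩
        rw [← this]
        congr 1
        simp
    · rw [if_neg hs]
      have : pq.1 + pq.2 = K := hsum pq (by simp)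
      show (mkSt arr brr pq).2.2 = 2 * (K : Int)
      simp only [mkSt]
      omega

-- the level-by-level run of the BFS
theorem bfs_levels (arr brr : List Int) (K : Nat)
    (hall : ∀ k : Nat, k < K → ovB arr brr (k : Int) = true ∧ ovB arr brr (-(k : Int)) = true)
    (hstop : ovB arr brr (K : Int) = false ∨ ovB arr brr (-(K : Int)) = false) :
    ∀ (n m fuel : Nat), m + n = K → 2 ^ (K + 1) - 2 ^ m ≤ fuel →
      bfsLoop fuel ((level m).map (mkSt arr brr)) = 2 * (K : Int) := by
  intro n
  induction n with
  | zero =>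
    intro m fuel hm hfuel
    have hmK : m = K := by omega
    subst hmK
    have hpow : (2:Nat) ^ m ≤ 2 ^ (m + 1) := Nat.pow_le_pow_right (by norm_num) (by omega)
    have hpow2 : (2:Nat) ^ (m + 1) = 2 * 2 ^ m := by ring
    rw [← List.append_nil ((level m).map (mkSt arr brr))]
    refine bfs_final arr brr m _ [] fuel (by rw [level_len]; omega) (level_sum m) ?_
    · rcases hstop with h | h
      · refine ⟨(m, 0), level_mem m m 0 (by omega), ?_⟩
        show isSame (zerosI m ++ arr ++ zerosI 0) (zerosI 0 ++ brr ++ zerosI m) = false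
        rw [isSame_eq_ovB]
        simpa using h
      · refine ⟨(0, m), level_mem m 0 m (by omega), ?_⟩
        show isSame (zerosI 0 ++ arr ++ zerosI m) (zerosI m ++ brr ++ zerosI 0) = false
        rw [isSame_eq_ovB]
        simpa using h
  | succ n ih =>
    intro m fuel hm hfuel
    have hmK : m < K := by omega
    have hpowm : (2:Nat) ^ (m + 1) = 2 * 2 ^ m := by ring
    have hpowle : (2:Nat) ^ (m + 1) ≤ 2 ^ (K + 1) := Nat.pow_le_pow_right (by norm_num) (by omega)
    have hov : ∀ pq ∈ level m, isSame (mkSt arr brr pq).1 (mkSt arr brr pq).2.1 = true := by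
      intro pq hpq
      obtain ⟨p, q⟩ := pq
      have hsum : p + q = m := level_sum m (p, q) hpq
      show isSame (zerosI p ++ arr ++ zerosI q) (zerosI q ++ brr ++ zerosI p) = true
      rw [isSame_eq_ovB]
      rcases Nat.lt_or_ge p q with hlt | hle
      · have : (p : Int) - (q : Int) = -((q - p : Nat) : Int) := by omega
        rw [this]
        exact (hall (q - p) (by omega)).2
      · have : (p : Int) - (q : Int) = ((p - q : Nat) : Int) := by omega
        rw [this]
        exact (hall (p - q) (by omega)).1
    have hlen : (level m).length ≤ fuel := by rw [level_len]; omega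
    have := bfs_process arr brr (level m) [] fuel hlen hov
    rw [List.append_nil] at this
    rw [this, List.nil_append]
    rw [show (level m).flatMap (fun pq => [(pq.1 + 1, pq.2), (pq.1, pq.2 + 1)]) = level (m + 1)
      from rfl]
    apply ih (m + 1) _ (by omega)
    rw [level_len]
    omega

theorem findK_stop (arr brr : List Int) :
    ∀ k, ¬(ovB arr brr ((findK arr brr k : Nat) : Int) = true ∧
      ovB arr brr (-((findK arr brr k : Nat) : Int)) = true) := by
  intro k
  fun_induction findK arr brr k with
  | case1 k h ih => exact ih
  | case2 k h =>
    rw [Bool.and_eq_true] at h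
    exact h

theorem findK_mid (arr brr : List Int) :
    ∀ k j, k ≤ j → j < findK arr brr k →
      ovB arr brr ((j : Nat) : Int) = true ∧ ovB arr brr (-((j : Nat) : Int)) = true := by
  intro k
  fun_induction findK arr brr k with
  | case1 k h ih =>
    intro j hkj hjf
    rcases Nat.eq_or_lt_of_le hkj with rfl | hlt
    · rw [Bool.and_eq_true] at h; exact h
    · exact ih j hlt hjf
  | case2 k h =>
    intro j hkj hjf
    omega

theorem findK_le (arr brr : List Int) : findK arr brr 0 ≤ brr.length := by
  by_contra h
  have hlt : brr.length < findK arr brr 0 := Nat.lt_of_not_le h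
  have := (findK_mid arr brr 0 brr.length (by omega) hlt).1
  exact absurd (ovB_true_lt arr brr brr.length this) (by omega)

-- ===== VERDICT (by name: the statement is the Claim_ definition above) =====
theorem solution_spec : Claim_equal_solution := by
  intro arr brr _ _
  unfold Spec_solution solution solution_alt
  set K := findK arr brr 0 with hK
  have hall : ∀ k : Nat, k < K → ovB arr brr (k : Int) = true ∧ ovB arr brr (-(k : Int)) = true :=
    fun k hk => findK_mid arr brr 0 k (by omega) hk
  have hstop : ovB arr brr (K : Int) = false ∨ ovB arr brr (-(K : Int)) = false := by
    have := findK_stop arr brr 0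
    rw [← hK] at this
    rcases h1 : ovB arr brr (K : Int) with _ | _
    · exact Or.inl rfl
    · rcases h2 : ovB arr brr (-(K : Int)) with _ | _
      · exact Or.inr rfl
      · exact absurd ⟨h1, h2⟩ this
  have hstart : [(arr, brr, (0 : Int))] = (level 0).map (mkSt arr brr) := by
    simp [level, mkSt, zerosI]
  rw [hstart]
  have hKle : K ≤ brr.length := findK_le arr brr
  have hpow : (2:Nat) ^ (K + 1) ≤ 2 ^ (brr.length + 1) :=
    Nat.pow_le_pow_right (by norm_num) (by omega)
  refine bfs_levels arr brr K hall hstop K 0 _ (by omega) ?_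
  exact Nat.le_trans (Nat.sub_le _ _) hpow
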